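-- pv_equiv track=rewrite | github.com/rslabon/aoc2015 | src/aoc2015/day17.py | combinations_of_containers
-- ===== SOURCE A (Python) =====
-- def combinations_of_containers(containers, value, prev_containers):
--     if value < 0:
--         return None
--     if value == 0:
--         return [prev_containers]
--     if not containers:
--         return None
--
--     result = []
--     for i, container in enumerate(containers):
--         comb = combinations_of_containers(containers[i + 1:], value - container, prev_containers + [container])
--         if comb:
--             result += comb
--
--     return result
-- ===== SOURCE B (Python) =====
-- def combinations_of_containers(containers, value, prev_containers):
--     if value < 0:
--         return None
--     if value == 0:
--         return [prev_containers]
--     if not containers: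
--         return None
--     first, rest = containers[0], containers[1:]
--     inc = combinations_of_containers(rest, value - first, prev_containers + [first])
--     exc = combinations_of_containers(rest, value, prev_containers)
--     result = []
--     if inc:
--         result += inc
--     if exc:
--         result += exc
--     return result
-- ===== Notes on version B (the rewrite author's own statement) =====
-- stated objective: alternative
-- what changed: Replaced A's n-way loop over enumerate with repeated suffix slicing by the classic two-way include/exclude head-tail recursion on the first container.
import Mathlib
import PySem

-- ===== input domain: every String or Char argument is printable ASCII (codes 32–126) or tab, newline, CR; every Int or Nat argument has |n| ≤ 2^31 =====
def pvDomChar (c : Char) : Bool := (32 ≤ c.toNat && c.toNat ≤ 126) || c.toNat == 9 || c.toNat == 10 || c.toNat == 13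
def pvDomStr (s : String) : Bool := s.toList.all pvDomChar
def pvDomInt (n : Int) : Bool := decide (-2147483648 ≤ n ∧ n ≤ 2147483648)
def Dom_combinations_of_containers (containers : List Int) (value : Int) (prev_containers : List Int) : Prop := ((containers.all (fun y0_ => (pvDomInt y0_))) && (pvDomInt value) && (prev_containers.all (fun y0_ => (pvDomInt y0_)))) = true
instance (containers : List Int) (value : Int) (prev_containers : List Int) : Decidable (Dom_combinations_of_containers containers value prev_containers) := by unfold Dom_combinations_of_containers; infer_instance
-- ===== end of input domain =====

-- ===== PORT A =====
-- A: suffix loop with enumerate; Python's None is rendered as [] (truthiness of None and [] coincide in A's `if comb:`).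
mutual
def combinations_of_containers (containers : List Int) (value : Int) (prev_containers : List Int) : List (List Int) :=
  if value < 0 then []
  else if value = 0 then [prev_containers]
  else if containers.isEmpty then []
  else pvLoopA containers value prev_containers []
  termination_by (2 * containers.length + 1, 0)

def pvLoopA (containers : List Int) (value : Int) (prev_containers : List Int) (result : List (List Int)) : List (List Int) :=
  match containers with
  | [] => result
  | c :: rest =>
      let comb := combinations_of_containers rest (value - c) (prev_containers ++ [c])
      pvLoopA rest value prev_containers (if comb ≠ [] then result ++ comb else result)
  termination_by (2 * containers.length, 1)
end

-- ===== PORT B =====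
-- B: include/exclude head-tail recursion (same base cases; None rendered as []).
def combinations_of_containers_alt (containers : List Int) (value : Int) (prev_containers : List Int) : List (List Int) :=
  if value < 0 then []
  else if value = 0 then [prev_containers]
  else
    match containers with
    | [] => []
    | first :: rest =>
        let inc := combinations_of_containers_alt rest (value - first) (prev_containers ++ [first])
        let exc := combinations_of_containers_alt rest value prev_containers
        (if inc ≠ [] then inc else []) ++ (if exc ≠ [] then exc else [])
  termination_by containers.length

-- ===== PRECONDITION & SPEC =====
-- Pre_ excludes exactly the inputs on which Python A returns None (not a list): value < 0, or value > 0 with no containers.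
def Pre_combinations_of_containers (containers : List Int) (value : Int) (prev_containers : List Int) : Prop :=
  0 ≤ value ∧ (value = 0 ∨ containers ≠ [])
instance (containers : List Int) (value : Int) (prev_containers : List Int) : Decidable (Pre_combinations_of_containers containers value prev_containers) := by unfold Pre_combinations_of_containers; infer_instance
def pvWitness_combinations_of_containers : List Int × Int × List Int := ([1, 2, 3], 3, [])
def Spec_combinations_of_containers (containers : List Int) (value : Int) (prev_containers : List Int) (out : List (List Int)) : Prop := out = combinations_of_containers_alt containers value prev_containers
instance (containers : List Int) (value : Int) (prev_containers : List Int) (out : List (List Int)) : Decidable (Spec_combinations_of_containers containers value prev_containers out) := by unfold Spec_combinations_of_containers; infer_instance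

-- ===== CLAIM (what is proved, stated in full; the proofs are below) =====
def Claim_equal_combinations_of_containers : Prop := ∀ (containers : List Int) (value : Int) (prev_containers : List Int), Dom_combinations_of_containers containers value prev_containers → Pre_combinations_of_containers containers value prev_containers → Spec_combinations_of_containers containers value prev_containers (combinations_of_containers containers value prev_containers)

-- ===== LEMMAS AND PROOFS =====
-- The loop accumulator factors out.
theorem pvLoopA_acc (l : List Int) (v : Int) (p : List Int) (acc : List (List Int)) :
    pvLoopA l v p acc = acc ++ pvLoopA l v p [] := by
  induction l generalizing acc with
  | nil => simp [pvLoopA]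
  | cons c t ih =>
      rw [pvLoopA, pvLoopA]
      rw [ih, ih (if _ ≠ [] then [] ++ _ else [])]
      split_ifs <;> simp

-- For positive value, A is exactly its loop started with the empty result.
theorem combA_pos (l : List Int) (v : Int) (p : List Int) (hv : 0 < v) :
    combinations_of_containers l v p = pvLoopA l v p [] := by
  rw [combinations_of_containers]
  cases l with
  | nil => simp [pvLoopA, hv.ne', not_lt.mpr hv.le]
  | cons c t => simp [hv.ne', not_lt.mpr hv.le]

theorem combA_eq_alt (l : List Int) : ∀ (v : Int) (p : List Int),
    combinations_of_containers l v p = combinations_of_containers_alt l v p := by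
  induction l with
  | nil =>
      intro v p
      rw [combinations_of_containers, combinations_of_containers_alt]
      simp [pvLoopA]
  | cons c t ih =>
      intro v p
      by_cases h1 : v < 0
      · rw [combinations_of_containers, combinations_of_containers_alt]; simp [h1]
      by_cases h2 : v = 0
      · rw [combinations_of_containers, combinations_of_containers_alt]; simp [h2]
      have hv : 0 < v := by omega
      rw [combA_pos _ _ _ hv, combinations_of_containers_alt, pvLoopA, pvLoopA_acc]
      have he : pvLoopA t v p [] = combinations_of_containers_alt t v p := by
        rw [← combA_pos t v p hv, ih]
      rw [he, ih]
      simp only [if_neg h1, if_neg h2]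
      by_cases hx : combinations_of_containers_alt t (v - c) (p ++ [c]) = []
      · by_cases hy : combinations_of_containers_alt t v p = [] <;> simp [hx, hy]
      · by_cases hy : combinations_of_containers_alt t v p = [] <;> simp [hx, hy]

-- ===== VERDICT (by name: the statement is the Claim_ definition above) =====
theorem combinations_of_containers_spec : Claim_equal_combinations_of_containers := by
  intro containers value prev_containers _ _
  unfold Spec_combinations_of_containers
  exact combA_eq_alt containers value prev_containers
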